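-- pv_equiv track=rewrite | github.com/akkey2017/mahjong_discard_model_v2 | mahjong_ai_features.py | _make_pai_counter_list_from
-- ===== SOURCE A (Python) =====
-- FEATURE_TILE_MAP = {
--     **{f"m{i}": i for i in range(1, 10)},
--     "m0": 0,
--     **{f"p{i}": i + 10 for i in range(1, 10)},
--     "p0": 10,
--     **{f"s{i}": i + 20 for i in range(1, 10)},
--     "s0": 20,
--     **{f"z{i}": i + 29 for i in range(1, 8)},
-- }
--
-- def _make_pai_counter_list_from(shoupai_str: str) -> list:
--     """牌姿文字列を37次元のリストに変換"""
--     pai_list = [0] * 37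
--     current_suit = ''
--     for pai in shoupai_str:
--         if pai in 'mpsz':
--             current_suit = pai
--         else:
--             key = current_suit + pai
--             if key in FEATURE_TILE_MAP:
--                 pai_list[FEATURE_TILE_MAP[key]] += 1
--     return pai_list
-- ===== SOURCE B (Python) =====
-- def _tile_index(suit, ch):
--     """Closed-form index: suit base + digit value, no lookup table."""
--     d = ord(ch) - 48
--     if d < 0 or d > 9:
--         return None
--     if suit == 'm':
--         return d
--     if suit == 'p':
--         return 10 + d
--     if suit == 's':
--         return 20 + d
--     if suit == 'z':
--         return 29 + d if 1 <= d <= 7 else None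
--     return None
--
--
-- def _make_pai_counter_list_from(shoupai_str: str) -> list:
--     """Segment decomposition + arithmetic tile index (no dict)."""
--     pai_list = [0] * 37
--     n = len(shoupai_str)
--     i = 0
--     # characters before the first suit letter can never match: skip them
--     while i < n and shoupai_str[i] not in 'mpsz':
--         i += 1
--     while i < n:
--         suit = shoupai_str[i]
--         j = i + 1
--         while j < n and shoupai_str[j] not in 'mpsz':
--             j += 1
--         for ch in shoupai_str[i + 1:j]:
--             idx = _tile_index(suit, ch)
--             if idx is not None:
--                 pai_list[idx] += 1
--         i = j
--     return pai_list
-- ===== Notes on version B (the rewrite author's own statement) =====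
-- stated objective: alternative
-- what changed: Replaces A's single stateful pass over the 37-entry lookup dict by a segment decomposition (outer scan finds suit-letter boundaries, inner loop processes each segment against its fixed suit) with the tile index computed by closed-form arithmetic (suit base + digit value) instead of the FEATURE_TILE_MAP table.
import Mathlib
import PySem

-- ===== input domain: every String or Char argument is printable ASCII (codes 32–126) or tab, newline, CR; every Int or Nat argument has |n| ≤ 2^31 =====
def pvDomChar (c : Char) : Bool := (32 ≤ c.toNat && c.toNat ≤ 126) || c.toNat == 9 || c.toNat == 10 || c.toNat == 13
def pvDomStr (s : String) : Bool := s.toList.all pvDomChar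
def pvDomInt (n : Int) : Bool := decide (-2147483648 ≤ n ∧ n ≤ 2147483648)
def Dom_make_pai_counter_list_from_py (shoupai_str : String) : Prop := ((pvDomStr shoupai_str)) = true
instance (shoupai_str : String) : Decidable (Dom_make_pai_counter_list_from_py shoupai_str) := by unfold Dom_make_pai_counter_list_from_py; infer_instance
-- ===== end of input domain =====

-- B replaces A's stateful dict-lookup pass by a suit-segment decomposition with a closed-form
-- arithmetic tile index (objective: alternative).

-- ===== PORT A =====
-- FEATURE_TILE_MAP, a module-level constant dict, written out as its literal value in insertion order
def tileMap : PySem.Dict String Int :=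
  PySem.Dict.mk [("m1", 1), ("m2", 2), ("m3", 3), ("m4", 4), ("m5", 5), ("m6", 6), ("m7", 7), ("m8", 8), ("m9", 9), ("m0", 0), ("p1", 11), ("p2", 12), ("p3", 13), ("p4", 14), ("p5", 15), ("p6", 16), ("p7", 17), ("p8", 18), ("p9", 19), ("p0", 10), ("s1", 21), ("s2", 22), ("s3", 23), ("s4", 24), ("s5", 25), ("s6", 26), ("s7", 27), ("s8", 28), ("s9", 29), ("s0", 20), ("z1", 30), ("z2", 31), ("z3", 32), ("z4", 33), ("z5", 34), ("z6", 35), ("z7", 36)]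

-- one step of A's for-loop; state = (current_suit as a list of chars, pai_list)
def stepA (st : List Char × List Int) (pai : Char) : List Char × List Int :=
  if "mpsz".toList.contains pai then ([pai], st.2)
  else
    match tileMap.get? (String.ofList (st.1 ++ [pai])) with
    | some idx => (st.1, st.2.modify idx.toNat (· + 1))
    | none => st

def make_pai_counter_list_from_py (shoupai_str : String) : List Int :=
  (shoupai_str.toList.foldl stepA ([], List.replicate 37 0)).2

-- ===== PORT B =====
-- closed-form tile index: suit base + digit value (Source B's _tile_index)
def tileIndex (suit : Char) (ch : Char) : Option Nat :=
  let d : Int := (ch.toNat : Int) - 48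
  if d < 0 ∨ 9 < d then none
  else if suit = 'm' then some d.toNat
  else if suit = 'p' then some (10 + d.toNat)
  else if suit = 's' then some (20 + d.toNat)
  else if suit = 'z' then (if 1 ≤ d ∧ d ≤ 7 then some (29 + d.toNat) else none)
  else none

def notSuit (c : Char) : Bool := !("mpsz".toList.contains c)

-- the inner for-loop over one segment's tile characters, with its fixed suit letter
def innerB (suit : Char) (counts : List Int) (seg : List Char) : List Int :=
  seg.foldl (fun l ch =>
    match tileIndex suit ch with
    | some idx => l.modify idx (· + 1)
    | none => l) counts

-- the outer while-loop: the head is a suit letter, the segment runs up to the next suit letter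
def segLoop (cs : List Char) (counts : List Int) : List Int :=
  match cs with
  | [] => counts
  | suit :: rest =>
      segLoop (rest.dropWhile notSuit) (innerB suit counts (rest.takeWhile notSuit))
termination_by cs.length
decreasing_by
  exact Nat.lt_succ_of_le (List.length_dropWhile_le _ _)

def make_pai_counter_list_from_py_alt (shoupai_str : String) : List Int :=
  segLoop (shoupai_str.toList.dropWhile notSuit) (List.replicate 37 0)

-- ===== PRECONDITION & SPEC =====
def Spec_make_pai_counter_list_from_py (shoupai_str : String) (out : List Int) : Prop := out = make_pai_counter_list_from_py_alt shoupai_str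
instance (shoupai_str : String) (out : List Int) : Decidable (Spec_make_pai_counter_list_from_py shoupai_str out) := by unfold Spec_make_pai_counter_list_from_py; infer_instance

-- ===== CLAIM =====
def Claim_equal_make_pai_counter_list_from_py : Prop := ∀ (shoupai_str : String), Dom_make_pai_counter_list_from_py shoupai_str → Spec_make_pai_counter_list_from_py shoupai_str (make_pai_counter_list_from_py shoupai_str)

-- ===== LEMMAS AND PROOFS =====

-- a character in '0'..'9' is one of the ten digit literals
theorem digit_enum (c : Char) (h1 : 48 ≤ c.toNat) (h2 : c.toNat ≤ 57) :
    c = '0' ∨ c = '1' ∨ c = '2' ∨ c = '3' ∨ c = '4' ∨ c = '5' ∨ c = '6' ∨ c = '7' ∨ c = '8' ∨ c = '9' := by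
  have hv : c.toNat = 48 ∨ c.toNat = 49 ∨ c.toNat = 50 ∨ c.toNat = 51 ∨ c.toNat = 52 ∨ c.toNat = 53 ∨ c.toNat = 54 ∨ c.toNat = 55 ∨ c.toNat = 56 ∨ c.toNat = 57 := by omega
  have hof : Char.ofNat c.toNat = c := Char.ofNat_toNat c
  rcases hv with h|h|h|h|h|h|h|h|h|h <;> rw [← hof, h] <;> simp

-- no key of tileMap ends in a non-digit character
theorem get?_nonDigit (sc c : Char) (h : c.toNat < 48 ∨ 57 < c.toNat) :
    tileMap.get? (String.ofList [sc, c]) = none := by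
  rw [PySem.Dict.get?_eq_none_iff_not_mem_keys]
  intro hm
  have hall : ∀ k ∈ tileMap.keys, 48 ≤ (k.toList.getD 1 'x').toNat ∧ (k.toList.getD 1 'x').toNat ≤ 57 := by decide
  have := hall _ hm
  rw [String.toList_ofList] at this
  simp [List.getD] at this
  omega

-- for a real suit letter, the dict lookup IS the arithmetic index
theorem get?_eq_tileIndex (sc c : Char) (hs : "mpsz".toList.contains sc = true) :
    tileMap.get? (String.ofList [sc, c]) = (tileIndex sc c).map Int.ofNat := by
  have hsc : sc = 'm' ∨ sc = 'p' ∨ sc = 's' ∨ sc = 'z' := by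
    simpa using hs
  by_cases hd : 48 ≤ c.toNat ∧ c.toNat ≤ 57
  · rcases digit_enum c hd.1 hd.2 with h|h|h|h|h|h|h|h|h|h <;>
      rcases hsc with h2|h2|h2|h2 <;> subst h <;> subst h2 <;> decide
  · rw [get?_nonDigit sc c (by omega)]
    simp only [tileIndex]
    rw [if_pos (by omega)]
    simp

-- a one-character key is never in the map
theorem get?_single_none (c : Char) : tileMap.get? (String.ofList [c]) = none := by
  rw [PySem.Dict.get?_eq_none_iff_not_mem_keys]
  intro hm
  have hall : ∀ k ∈ tileMap.keys, k.toList.length = 2 := by decide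
  have := hall _ hm
  rw [String.toList_ofList] at this
  simp at this

-- segment lemma: with a one-letter suit state, A's fold over the rest equals B's segment processing
theorem runA_suit (cs : List Char) (sc : Char) (hs : "mpsz".toList.contains sc = true) (counts : List Int) :
    (cs.foldl stepA ([sc], counts)).2
      = segLoop (cs.dropWhile notSuit) (innerB sc counts (cs.takeWhile notSuit)) := by
  induction cs generalizing sc hs counts with
  | nil => simp [segLoop, innerB]
  | cons c rest ih =>
    cases hc : "mpsz".toList.contains c with
    | true =>
      have hns : notSuit c = false := by simp only [notSuit, hc, Bool.not_true]
      simp only [List.foldl_cons, stepA, hc, if_true]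
      rw [ih c hc]
      rw [List.dropWhile_cons_of_neg (by simp [hns]), List.takeWhile_cons_of_neg (by simp [hns])]
      simp [segLoop, innerB]
    | false =>
      have hns : notSuit c = true := by simp only [notSuit, hc, Bool.not_false]
      simp only [List.foldl_cons, stepA, hc, Bool.false_eq_true, if_false, List.cons_append,
        List.nil_append]
      rw [List.dropWhile_cons_of_pos hns, List.takeWhile_cons_of_pos hns]
      rw [get?_eq_tileIndex sc c hs]
      cases hm : tileIndex sc c with
      | none =>
        simp only [Option.map_none]
        rw [ih sc hs]
        simp [innerB, hm]
      | some idx =>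
        simp only [Option.map_some]
        rw [ih sc hs]
        simp [innerB, hm]

-- main lemma: the whole of A equals B's skip-prefix-then-segments loop
theorem runA_empty (cs : List Char) (counts : List Int) :
    (cs.foldl stepA ([], counts)).2 = segLoop (cs.dropWhile notSuit) counts := by
  induction cs generalizing counts with
  | nil => simp [segLoop]
  | cons c rest ih =>
    cases hc : "mpsz".toList.contains c with
    | true =>
      have hns : notSuit c = false := by simp only [notSuit, hc, Bool.not_true]
      simp only [List.foldl_cons, stepA, hc, if_true]
      rw [runA_suit rest c hc, List.dropWhile_cons_of_neg (by simp [hns])]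
      simp [segLoop]
    | false =>
      have hns : notSuit c = true := by simp only [notSuit, hc, Bool.not_false]
      simp only [List.foldl_cons, stepA, hc, Bool.false_eq_true, if_false, List.nil_append,
        get?_single_none]
      rw [ih, List.dropWhile_cons_of_pos hns]

-- ===== VERDICT =====
theorem make_pai_counter_list_from_py_spec : Claim_equal_make_pai_counter_list_from_py := by
  intro s _
  unfold Spec_make_pai_counter_list_from_py make_pai_counter_list_from_py make_pai_counter_list_from_py_alt
  exact runA_empty s.toList _
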